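-- pv_equiv track=rewrite | github.com/bobtobey/ux-color-theme-generator | color_theme_generator_HSB.py | generate_shades
-- ===== SOURCE A (Python) =====
-- def interpolate(a, b, steps):
--     """
--     Returns a list of 'steps+1' values from a to b (inclusive),
--     linearly spaced.
--     """
--     return [a + (b - a) * (t / steps) for t in range(steps+1)]
--
-- def generate_shades(h, s_brand, b_brand,
--                     s_light=10, b_light=100,
--                     s_dark=100, b_dark=30):
--     """
--     Generates a 9-color palette:
--       - 100..400: From brand color up to 'lightest'
--       - 500:      Brand color
--       - 600..900: From brand color down to 'darkest'
--     """
--     # Number of intermediate steps in each direction (4 lighter, 4 darker)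
--     # I choose 4 steps for lightest/darkest shades to create a balanced palette between shades
--     steps = 4
--
--     # Interpolate from brand -> light
--     s_up   = interpolate(s_brand, s_light, steps)
--     b_up   = interpolate(b_brand, b_light, steps)
--
--     # Interpolate from brand -> dark
--     s_down = interpolate(s_brand, s_dark,  steps)
--     b_down = interpolate(b_brand, b_dark,  steps)
--
--     # The 'brand color' is included at index 0 of both s_up, s_down,
--     # so we skip that index once when combining final results.
--     # lightest will be the last in the up array, darkest is last in the down array.
--     # We'll reverse the 'up' so it goes from lightest to brand, then join with brand->dark.
--
--     # Shades 100..500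
--     up_shades = list(zip(s_up, b_up))  # from brand to light
--     # up_shades[-1] is the lightest end. If we want them from 100->500, reverse them:
--     up_shades = up_shades[::-1]  # now up_shades[0] is the lightest
--
--     # Shades 500..900
--     down_shades = list(zip(s_down, b_down))  # from brand to dark
--
--     # Combine them so we get 100..900:
--     # up_shades = 5 entries (indexes 0..4 => 100..500),
--     # down_shades = 5 entries (indexes 0..4 => 500..900)
--     # But brand color is duplicated in both ( index 4 of up_shades and index 0 of down_shades ).
--     # We'll remove one of the brand color duplicates.
--     palette = up_shades[:-1] + down_shades  # remove the last from the first to avoid duplication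
--
--     # Now label them 100..900 in increments of 100
--     labels = [i * 100 for i in range(1, 10)]
--
--     # Build final list of (label, (h, s, b))
--     final = []
--     for label, (s_val, b_val) in zip(labels, palette):
--         # Round or keep floats as you wish
--         final.append((label, (h, round(s_val), round(b_val))))
--
--     return final
-- ===== SOURCE B (Python) =====
-- def generate_shades(h, s_brand, b_brand,
--                     s_light=10, b_light=100,
--                     s_dark=100, b_dark=30):
--     """Single pass: for each shade j (label j*100) evaluate the lerp directly."""
--     def lerp(a, b, t):
--         return a + (b - a) * (t / 4)
--     final = []
--     for j in range(1, 10):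
--         if j <= 4:
--             t = 5 - j
--             s_val = lerp(s_brand, s_light, t)
--             b_val = lerp(b_brand, b_light, t)
--         else:
--             t = j - 5
--             s_val = lerp(s_brand, s_dark, t)
--             b_val = lerp(b_brand, b_dark, t)
--         final.append((j * 100, (h, round(s_val), round(b_val))))
--     return final
-- ===== Notes on version B (the rewrite author's own statement) =====
-- stated objective: simpler
-- what changed: Replaced the four interpolate arrays plus reverse/slice/concat/zip/label plumbing with a single loop over j=1..9 that computes each shade's label and lerp endpoint/parameter directly.
import Mathlib
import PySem

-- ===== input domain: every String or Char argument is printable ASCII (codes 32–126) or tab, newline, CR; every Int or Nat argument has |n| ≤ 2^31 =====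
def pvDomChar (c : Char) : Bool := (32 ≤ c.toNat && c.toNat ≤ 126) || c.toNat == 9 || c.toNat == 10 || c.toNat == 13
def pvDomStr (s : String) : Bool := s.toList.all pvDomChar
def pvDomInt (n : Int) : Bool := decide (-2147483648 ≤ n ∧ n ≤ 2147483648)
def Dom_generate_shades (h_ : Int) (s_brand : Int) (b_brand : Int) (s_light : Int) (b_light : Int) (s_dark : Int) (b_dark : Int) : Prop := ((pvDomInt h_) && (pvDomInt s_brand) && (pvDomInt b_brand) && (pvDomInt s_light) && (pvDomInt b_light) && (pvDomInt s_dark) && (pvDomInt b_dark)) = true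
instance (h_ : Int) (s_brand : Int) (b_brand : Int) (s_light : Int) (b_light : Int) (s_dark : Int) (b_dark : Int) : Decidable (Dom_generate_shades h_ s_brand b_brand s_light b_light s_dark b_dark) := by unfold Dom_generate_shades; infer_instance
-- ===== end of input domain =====

-- B drops the four interpolate arrays, the reverse/slice/concat/zip plumbing and computes each
-- of the 9 shades directly in one pass (objective: simpler).
-- Float note (both ports): on the |n| ≤ 2^31 domain every value a + (b-a)*(t/4), t ∈ 0..4, is an
-- exact binary float equal to the rational (4a + (b-a)*t)/4, so the ports carry the exact integer
-- numerator (denominator 4) and Python's round (half-to-even) is pyRound4 below; this is exact.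

-- Python round(n/4) : round half to even (exact for quarter-integer floats)
def pyRound4 (n : Int) : Int :=
  let q := PySem.Int.floordiv n 4
  let r := n - 4 * q
  if r = 0 then q
  else if r = 1 then q
  else if r = 2 then (if q % 2 = 0 then q else q + 1)
  else q + 1

-- ===== PORT A =====
-- interpolate(a, b, steps): each value a + (b-a)*(t/steps) represented by its numerator over
-- `steps` (exact for the only call site, steps = 4)
def interpolateN (a b steps : Int) : List Int :=
  (PySem.List.pyRange 0 (steps + 1) 1).map (fun t => a * steps + (b - a) * t)

def generate_shades (h_ : Int) (s_brand : Int) (b_brand : Int) (s_light : Int) (b_light : Int) (s_dark : Int) (b_dark : Int) : List (Int × (Int × Int × Int)) :=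
  let steps : Int := 4
  let s_up := interpolateN s_brand s_light steps
  let b_up := interpolateN b_brand b_light steps
  let s_down := interpolateN s_brand s_dark steps
  let b_down := interpolateN b_brand b_dark steps
  let up_shades := s_up.zip b_up
  let up_shades := up_shades.reverse            -- up_shades[::-1]
  let down_shades := s_down.zip b_down
  let palette := up_shades.dropLast ++ down_shades   -- up_shades[:-1] + down_shades
  let labels := (PySem.List.pyRange 1 10 1).map (fun i => i * 100)
  (labels.zip palette).foldl
    (fun final p => final ++ [(p.1, (h_, pyRound4 p.2.1, pyRound4 p.2.2))]) []

-- ===== PORT B =====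
-- lerp(a, b, t) = a + (b-a)*(t/4), carried as its exact numerator over 4
def lerpN (a b t : Int) : Int := a * 4 + (b - a) * t

def generate_shades_alt (h_ : Int) (s_brand : Int) (b_brand : Int) (s_light : Int) (b_light : Int) (s_dark : Int) (b_dark : Int) : List (Int × (Int × Int × Int)) :=
  (PySem.List.pyRange 1 10 1).foldl
    (fun final j =>
      let sb :=
        if j ≤ 4 then
          (lerpN s_brand s_light (5 - j), lerpN b_brand b_light (5 - j))
        else
          (lerpN s_brand s_dark (j - 5), lerpN b_brand b_dark (j - 5))
      final ++ [(j * 100, (h_, pyRound4 sb.1, pyRound4 sb.2))]) []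

-- ===== PRECONDITION & SPEC =====
def Spec_generate_shades (h_ : Int) (s_brand : Int) (b_brand : Int) (s_light : Int) (b_light : Int) (s_dark : Int) (b_dark : Int) (out : List (Int × (Int × Int × Int))) : Prop := out = generate_shades_alt h_ s_brand b_brand s_light b_light s_dark b_dark
instance (h_ : Int) (s_brand : Int) (b_brand : Int) (s_light : Int) (b_light : Int) (s_dark : Int) (b_dark : Int) (out : List (Int × (Int × Int × Int))) : Decidable (Spec_generate_shades h_ s_brand b_brand s_light b_light s_dark b_dark out) := by unfold Spec_generate_shades; infer_instance

-- ===== CLAIM (what is proved, stated in full; the proofs are below) =====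
def Claim_equal_generate_shades : Prop := ∀ (h_ : Int) (s_brand : Int) (b_brand : Int) (s_light : Int) (b_light : Int) (s_dark : Int) (b_dark : Int), Dom_generate_shades h_ s_brand b_brand s_light b_light s_dark b_dark → Spec_generate_shades h_ s_brand b_brand s_light b_light s_dark b_dark (generate_shades h_ s_brand b_brand s_light b_light s_dark b_dark)

-- ===== LEMMAS AND PROOFS =====
theorem pyRange_0_5 : PySem.List.pyRange 0 5 1 = [0, 1, 2, 3, 4] := by decide
theorem pyRange_1_10 : PySem.List.pyRange 1 10 1 = [1, 2, 3, 4, 5, 6, 7, 8, 9] := by decide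

-- ===== VERDICT (by name: the statement is the Claim_ definition above) =====
theorem generate_shades_spec : Claim_equal_generate_shades := by
  intro h_ s_brand b_brand s_light b_light s_dark b_dark _
  unfold Spec_generate_shades generate_shades generate_shades_alt interpolateN lerpN
  simp [pyRange_0_5, pyRange_1_10, List.zip]
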